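-- pv_equiv track=rewrite | github.com/miliar/Code_Jam_Webscraper | solutions_python/Problem_155/1069.py | solve
-- ===== SOURCE A (Python) =====
-- def solve(S_max, S):
--     standing = 0
--     invite = 0
--     for i, s in enumerate(S):
--         if standing < i:
--             invite += i-standing
--             standing = i
--         if standing >= i:
--             standing += s
--     return invite
-- ===== SOURCE B (Python) =====
-- def solve(S_max, S):
--     # staged: build the list of prefix sums before each index, then take
--     # max(0, max_i (i - prefix_before_i)) over the deficits.
--     prefs = []
--     total = 0
--     for s in S:
--         prefs.append(total)
--         total += s
--     return max([0] + [i - p for i, p in enumerate(prefs)])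
-- ===== Notes on version B (the rewrite author's own statement) =====
-- stated objective: alternative
-- what changed: Replaces the greedy standing simulation with a staged closed-form computation: first build the list of prefix sums before each index, then return the maximum of 0 and the deficits i - prefix_before_i.
import Mathlib
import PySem

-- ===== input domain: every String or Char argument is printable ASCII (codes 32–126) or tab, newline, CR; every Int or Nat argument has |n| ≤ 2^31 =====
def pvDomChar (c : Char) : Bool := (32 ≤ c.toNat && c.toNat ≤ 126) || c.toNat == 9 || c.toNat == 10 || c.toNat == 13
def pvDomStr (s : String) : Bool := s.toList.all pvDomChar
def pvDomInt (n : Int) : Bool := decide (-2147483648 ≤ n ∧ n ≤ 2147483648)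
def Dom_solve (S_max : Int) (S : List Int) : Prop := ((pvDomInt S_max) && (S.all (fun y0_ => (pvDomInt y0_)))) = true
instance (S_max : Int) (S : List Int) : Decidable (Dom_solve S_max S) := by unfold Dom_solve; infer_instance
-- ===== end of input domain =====

-- B replaces the greedy simulation with a staged computation: build the prefix-sum list, then take the max of 0 and the deficits i - prefix_before_i — objective: alternative; same cost.
-- ===== PORT A =====
-- A: greedy simulation — top up standing to i (counting invites), then add s.
def solveStep (st : Int × Int) (p : Int × Int) : Int × Int :=
  let standing := st.1
  let invite := st.2
  let i := p.1
  let s := p.2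
  let invite := if standing < i then invite + (i - standing) else invite
  let standing := if standing < i then i else standing
  let standing := if standing ≥ i then standing + s else standing
  (standing, invite)

def solve (S_max : Int) (S : List Int) : Int :=
  ((PySem.List.enumerate S 0).foldl solveStep (0, 0)).2

-- ===== PORT B =====
-- B stage 1: the list of prefix sums strictly before each index.
def solvePrefs : List Int → Int → List Int
  | [], _ => []
  | s :: rest, total => total :: solvePrefs rest (total + s)

-- B stage 2/3: map each (i, prefix) to its deficit i - prefix, then max with 0.
def solve_alt (S_max : Int) (S : List Int) : Int :=
  ((PySem.List.enumerate (solvePrefs S 0) 0).map (fun q => q.1 - q.2)).foldl max 0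

-- ===== PRECONDITION & SPEC =====
def Spec_solve (S_max : Int) (S : List Int) (out : Int) : Prop := out = solve_alt S_max S
instance (S_max : Int) (S : List Int) (out : Int) : Decidable (Spec_solve S_max S out) := by unfold Spec_solve; infer_instance

-- ===== CLAIM (what is proved, stated in full; the proofs are below) =====
def Claim_equal_solve : Prop := ∀ (S_max : Int) (S : List Int), Dom_solve S_max S → Spec_solve S_max S (solve S_max S)

-- ===== LEMMAS AND PROOFS =====

-- Invariant: standing = prefix + invite and invite ≥ 0; A's remaining fold equals
-- folding max over the remaining deficits starting from the current invite count.
theorem solve_fold_inv (S : List Int) :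
    ∀ (i st inv p : Int), st = p + inv → 0 ≤ inv →
    ((PySem.List.enumerate S i).foldl solveStep (st, inv)).2
      = ((PySem.List.enumerate (solvePrefs S p) i).map (fun q => q.1 - q.2)).foldl max inv := by
  induction S with
  | nil => intro i st inv p h1 h2; simp [PySem.List.enumerate_nil, solvePrefs]
  | cons s rest ih =>
    intro i st inv p h1 h2
    simp only [solvePrefs, PySem.List.enumerate_cons, List.foldl_cons, List.map_cons]
    by_cases hlt : st < i
    · have hmax : max inv (i - p) = i - p := by omega
      have hiv : inv + (i - st) = i - p := by omega
      simp only [solveStep, if_pos hlt, ge_iff_le, le_refl, if_pos, hmax, hiv]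
      exact ih (i + 1) (i + s) (i - p) (p + s) (by omega) (by omega)
    · have hmax : max inv (i - p) = inv := by omega
      simp only [solveStep, if_neg hlt, hmax]
      have hge : st ≥ i := by omega
      simp only [if_pos hge]
      exact ih (i + 1) (st + s) inv (p + s) (by omega) h2

-- ===== VERDICT (by name: the statement is the Claim_ definition above) =====
theorem solve_spec : Claim_equal_solve := by
  intro S_max S _
  unfold Spec_solve solve solve_alt
  exact solve_fold_inv S 0 0 0 0 rfl le_rfl
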